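-- pv_equiv track=rewrite | github.com/jin11109/mini-raspi3-os | 02_Booting/host/send_img.py | crc32_update
-- ===== SOURCE A (Python) =====
-- CRC32_POLY = 0xEDB88320
--
-- def crc32_update(crc: int, data_byte: int) -> int:
--     crc ^= data_byte
--     for _ in range(8):
--         if crc & 1:
--             crc = (crc >> 1) ^ CRC32_POLY
--         else:
--             crc >>= 1
--     return crc
-- ===== SOURCE B (Python) =====
-- CRC32_POLY = 0xEDB88320
--
--
-- def _make_table():
--     table = []
--     for byte in range(256):
--         v = byte
--         for _ in range(8):
--             v = (v >> 1) ^ CRC32_POLY if v & 1 else v >> 1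
--         table.append(v)
--     return table
--
--
-- _CRC32_TABLE = _make_table()
--
--
-- def crc32_update(crc: int, data_byte: int) -> int:
--     x = crc ^ data_byte
--     return (x >> 8) ^ _CRC32_TABLE[x & 0xFF]
-- ===== Notes on version B (the rewrite author's own statement) =====
-- stated objective: idiomatic
-- what changed: Replaces the per-call 8-iteration bit loop by a 256-entry lookup table precomputed once at module load, using the GF(2) linearity identity loop8(x) = (x >> 8) ^ T[x & 0xFF].
import Mathlib
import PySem

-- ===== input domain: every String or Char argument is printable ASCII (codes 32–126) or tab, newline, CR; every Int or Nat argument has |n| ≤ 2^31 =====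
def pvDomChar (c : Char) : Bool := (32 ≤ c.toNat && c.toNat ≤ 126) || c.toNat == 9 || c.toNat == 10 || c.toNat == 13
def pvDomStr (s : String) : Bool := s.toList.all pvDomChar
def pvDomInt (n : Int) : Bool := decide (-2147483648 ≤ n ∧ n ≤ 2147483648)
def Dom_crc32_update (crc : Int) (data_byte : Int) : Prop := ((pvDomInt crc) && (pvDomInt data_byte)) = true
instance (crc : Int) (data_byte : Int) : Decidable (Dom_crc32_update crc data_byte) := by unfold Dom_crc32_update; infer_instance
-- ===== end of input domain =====

-- B replaces A's per-call 8-iteration bit loop by a 256-entry CRC table precomputed once (same loop, run per byte at table build), so each call is a shift, a mask and one lookup.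


-- ===== PORT A =====
def crc32_update (crc : Int) (data_byte : Int) : Int :=
  (PySem.List.pyRange 0 8).foldl
    (fun c _ => if PySem.Int.band c 1 ≠ 0 then PySem.Int.bxor (c >>> (1 : Nat)) 0xEDB88320 else c >>> (1 : Nat))
    (PySem.Int.bxor crc data_byte)

-- ===== PORT B =====
-- table entry: the inner 8-iteration loop of Source B's _make_table, run on one byte
def crc32_table_entry (byte : Int) : Int :=
  (PySem.List.pyRange 0 8).foldl
    (fun v _ => if PySem.Int.band v 1 ≠ 0 then PySem.Int.bxor (v >>> (1 : Nat)) 0xEDB88320 else v >>> (1 : Nat))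
    byte

-- _CRC32_TABLE = _make_table(): one entry per byte 0..255
def crc32_table : List Int := (PySem.List.pyRange 0 256).map crc32_table_entry

def crc32_update_alt (crc : Int) (data_byte : Int) : Int :=
  let x := PySem.Int.bxor crc data_byte
  -- pyGetD with default 0 is exact here: the index x & 0xFF always lies in [0, 256)
  PySem.Int.bxor (x >>> (8 : Nat)) (PySem.List.pyGetD crc32_table (PySem.Int.band x 255) 0)

-- ===== PRECONDITION & SPEC =====
def Spec_crc32_update (crc : Int) (data_byte : Int) (out : Int) : Prop := out = crc32_update_alt crc data_byte
instance (crc : Int) (data_byte : Int) (out : Int) : Decidable (Spec_crc32_update crc data_byte out) := by unfold Spec_crc32_update; infer_instance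

-- ===== CLAIM (what is proved, stated in full; the proofs are below) =====
def Claim_equal_crc32_update : Prop := ∀ (crc : Int) (data_byte : Int), Dom_crc32_update crc data_byte → Spec_crc32_update crc data_byte (crc32_update crc data_byte)

-- ===== LEMMAS AND PROOFS =====

-- one step of the bit loop on a non-negative value (Nat view)
def pvStepN (m : Nat) : Nat := if m &&& 1 = 1 then (m >>> 1) ^^^ 0xEDB88320 else m >>> 1
-- one step on the complement magnitude: Int.negSucc n steps to Int.negSucc (pvStepC n)
def pvStepC (m : Nat) : Nat := if m &&& 1 = 1 then m >>> 1 else (m >>> 1) ^^^ 0xEDB88320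
-- one step of the loop as written in both ports
def pvStepI (c : Int) : Int := if PySem.Int.band c 1 ≠ 0 then PySem.Int.bxor (c >>> (1 : Nat)) 0xEDB88320 else c >>> (1 : Nat)

lemma pv_shiftRight_xor (a b k : Nat) : (a ^^^ b) >>> k = (a >>> k) ^^^ (b >>> k) := by
  apply Nat.eq_of_testBit_eq
  intro i
  simp [Nat.testBit_shiftRight, Nat.testBit_xor]

lemma pvStepN_xor (a b : Nat) : pvStepN (a ^^^ b) = pvStepN a ^^^ pvStepN b := by
  unfold pvStepN
  have h1 : (a ^^^ b) &&& 1 = (a &&& 1) ^^^ (b &&& 1) := Nat.and_xor_distrib_right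
  have ha : a &&& 1 = 0 ∨ a &&& 1 = 1 := by rw [Nat.and_one_is_mod]; omega
  have hb : b &&& 1 = 0 ∨ b &&& 1 = 1 := by rw [Nat.and_one_is_mod]; omega
  rcases ha with ha | ha <;> rcases hb with hb | hb <;>
    simp [h1, ha, hb, pv_shiftRight_xor, Nat.xor_assoc, Nat.xor_comm, Nat.xor_left_comm]

lemma pvIterN_xor (k a b : Nat) : pvStepN^[k] (a ^^^ b) = pvStepN^[k] a ^^^ pvStepN^[k] b := by
  induction k generalizing a b with
  | zero => simp
  | succ k ih =>
    simp only [Function.iterate_succ_apply, pvStepN_xor, ih]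

lemma pvIterN_div (k : Nat) : ∀ m : Nat, 2 ^ k ∣ m → pvStepN^[k] m = m >>> k := by
  induction k with
  | zero => intro m _; simp
  | succ k ih =>
    intro m h
    obtain ⟨t, ht⟩ := h
    have h2 : m = 2 * (2 ^ k * t) := by rw [ht]; ring
    have heven : m &&& 1 = 0 := by rw [Nat.and_one_is_mod]; omega
    have hstep : pvStepN m = m >>> 1 := by simp [pvStepN, heven]
    have hdiv : m >>> 1 = 2 ^ k * t := by
      rw [Nat.shiftRight_eq_div_pow, pow_one]; omega
    rw [Function.iterate_succ_apply, hstep, hdiv, ih _ ⟨t, rfl⟩]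
    rw [Nat.shiftRight_eq_div_pow, Nat.shiftRight_eq_div_pow, ← hdiv,
      Nat.shiftRight_eq_div_pow, pow_one, Nat.div_div_eq_div_mul, pow_succ, mul_comm (2 ^ k) 2]

lemma pv_and255 (m : Nat) : m &&& 255 = m % 256 := by
  have := Nat.and_two_pow_sub_one_eq_mod m 8
  norm_num at this
  exact this

-- the key byte-decomposition identity for A's loop on non-negative values
lemma pvNat1 (m : Nat) : pvStepN^[8] m = (m >>> 8) ^^^ pvStepN^[8] (m &&& 255) := by
  have hself : (m ^^^ (m &&& 255)) &&& 255 = 0 := by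
    rw [Nat.and_xor_distrib_right, Nat.and_self_right, Nat.xor_self]
  have hdvd : 2 ^ 8 ∣ (m ^^^ (m &&& 255)) := by
    apply Nat.dvd_of_mod_eq_zero
    have := pv_and255 (m ^^^ (m &&& 255))
    norm_num
    omega
  have hlo : (m &&& 255) >>> 8 = 0 := by
    rw [Nat.shiftRight_eq_div_pow]
    exact Nat.div_eq_of_lt (by have := Nat.and_le_right (n := m) (m := 255); norm_num; omega)
  have hsh : (m ^^^ (m &&& 255)) >>> 8 = m >>> 8 := by
    rw [pv_shiftRight_xor, hlo, Nat.xor_zero]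
  have hm : m = (m ^^^ (m &&& 255)) ^^^ (m &&& 255) := by
    rw [Nat.xor_assoc, Nat.xor_self, Nat.xor_zero]
  calc pvStepN^[8] m = pvStepN^[8] ((m ^^^ (m &&& 255)) ^^^ (m &&& 255)) := by rw [← hm]
    _ = pvStepN^[8] (m ^^^ (m &&& 255)) ^^^ pvStepN^[8] (m &&& 255) := pvIterN_xor 8 _ _
    _ = (m >>> 8) ^^^ pvStepN^[8] (m &&& 255) := by rw [pvIterN_div 8 _ hdvd, hsh]

lemma pvStepC_eq (m : Nat) : pvStepC m = pvStepN m ^^^ 0xEDB88320 := by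
  unfold pvStepC pvStepN
  have h : m &&& 1 = m % 2 := Nat.and_one_is_mod m
  by_cases h2 : m % 2 = 1 <;> simp [h, h2]

lemma pvIterC_eq (k : Nat) : ∀ m : Nat, pvStepC^[k] m = pvStepN^[k] m ^^^ pvStepC^[k] 0 := by
  induction k with
  | zero => intro m; simp
  | succ k ih =>
    intro m
    have hc0 : pvStepC 0 = 0xEDB88320 := by decide
    rw [Function.iterate_succ_apply, Function.iterate_succ_apply, ih (pvStepC m), pvStepC_eq,
      pvIterN_xor, Function.iterate_succ_apply, hc0, ih 0xEDB88320, Nat.xor_assoc]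

lemma pvC8 : pvStepC^[8] 0 = pvStepN^[8] 255 := by decide

-- the byte-decomposition identity for the complement loop (negative values)
lemma pvNat2 (n : Nat) : pvStepC^[8] n = (n >>> 8) ^^^ pvStepN^[8] (255 ^^^ (n &&& 255)) := by
  rw [pvIterC_eq, pvC8, pvNat1 n, pvIterN_xor 8 255 (n &&& 255)]
  simp [Nat.xor_comm, Nat.xor_left_comm]

lemma pv_bxor_negSucc_ofNat (u t : Nat) : PySem.Int.bxor (Int.negSucc u) (Int.ofNat t) = Int.negSucc (u ^^^ t) := by
  have h1 : ¬ (0 : Int) ≤ Int.negSucc u := by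
    rw [Int.negSucc_eq]; omega
  have h2 : (0 : Int) ≤ Int.ofNat t := by exact Int.natCast_nonneg t
  simp only [PySem.Int.bxor, h1, h2, if_true, if_false]
  have h3 : (-Int.negSucc u - 1).toNat = u := by rw [Int.negSucc_eq]; omega
  have h4 : (Int.ofNat t).toNat = t := rfl
  rw [h3, h4, Int.negSucc_eq]
  ring

lemma pv_bxor_ofNat (m t : Nat) : PySem.Int.bxor (Int.ofNat m) (Int.ofNat t) = Int.ofNat (m ^^^ t) := by
  have := PySem.Int.bxor_natCast m t
  simpa using this

lemma pvStepI_ofNat (m : Nat) : pvStepI (Int.ofNat m) = Int.ofNat (pvStepN m) := by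
  unfold pvStepI pvStepN
  have hband : PySem.Int.band (Int.ofNat m) 1 = Int.ofNat (m &&& 1) := by
    have := PySem.Int.band_natCast m 1
    simpa using this
  have hsh : (Int.ofNat m) >>> (1 : Nat) = Int.ofNat (m >>> 1) := rfl
  rw [hband, hsh]
  by_cases h : m &&& 1 = 1
  · rw [if_pos (by rw [h]; decide), if_pos h]
    have := pv_bxor_ofNat (m >>> 1) 0xEDB88320
    simpa using this
  · have h0 : m &&& 1 = 0 := by rw [Nat.and_one_is_mod] at *; omega
    rw [if_neg (by rw [h0]; decide), if_neg h]

lemma pvStepI_negSucc (n : Nat) : pvStepI (Int.negSucc n) = Int.negSucc (pvStepC n) := by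
  unfold pvStepI pvStepC
  have hband : PySem.Int.band (Int.negSucc n) 1 = 1 - (n : Int) % 2 := by
    rw [PySem.Int.band_one, PySem.Int.mod_eq_emod_of_pos (by norm_num), Int.negSucc_eq]
    omega
  have hsh : (Int.negSucc n) >>> (1 : Nat) = Int.negSucc (n >>> 1) := rfl
  have hodd : n &&& 1 = n % 2 := Nat.and_one_is_mod n
  rw [hband, hsh]
  by_cases h : n % 2 = 0
  · rw [if_pos (by omega), if_neg (by omega)]
    have := pv_bxor_negSucc_ofNat (n >>> 1) 0xEDB88320
    simpa using this
  · rw [if_neg (by omega), if_pos (by omega)]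

lemma pvIterI_ofNat (k m : Nat) : pvStepI^[k] (Int.ofNat m) = Int.ofNat (pvStepN^[k] m) := by
  induction k generalizing m with
  | zero => rfl
  | succ k ih => rw [Function.iterate_succ_apply, Function.iterate_succ_apply, pvStepI_ofNat, ih]

lemma pvIterI_negSucc (k n : Nat) : pvStepI^[k] (Int.negSucc n) = Int.negSucc (pvStepC^[k] n) := by
  induction k generalizing n with
  | zero => rfl
  | succ k ih => rw [Function.iterate_succ_apply, Function.iterate_succ_apply, pvStepI_negSucc, ih]

lemma pvRange8 : PySem.List.pyRange 0 8 = [0, 1, 2, 3, 4, 5, 6, 7] := by decide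

lemma pvPortA_iter (c d : Int) : crc32_update c d = pvStepI^[8] (PySem.Int.bxor c d) := by
  unfold crc32_update
  rw [pvRange8]
  rfl

lemma pvEntry_iter (b : Int) : crc32_table_entry b = pvStepI^[8] b := by
  unfold crc32_table_entry
  rw [pvRange8]
  rfl

lemma pvLookup (j : Nat) (hj : j < 256) :
    PySem.List.pyGetD crc32_table ((j : Nat) : Int) 0 = pvStepI^[8] (Int.ofNat j) := by
  have h := PySem.List.pyGetD_map_pyRange crc32_table_entry 256 j 0 hj
  have h256 : ((256 : Nat) : Int) = (256 : Int) := by norm_num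
  rw [h256] at h
  rw [show crc32_table = List.map crc32_table_entry (PySem.List.pyRange 0 256) from rfl, h,
    pvEntry_iter]
  rfl

lemma pvBand255_ofNat (m : Nat) : PySem.Int.band (Int.ofNat m) 255 = Int.ofNat (m &&& 255) := by
  have := PySem.Int.band_natCast m 255
  simpa using this

lemma pvBand255_negSucc (n : Nat) : PySem.Int.band (Int.negSucc n) 255 = Int.ofNat (255 - (255 &&& n)) := by
  have h1 : ¬ (0 : Int) ≤ Int.negSucc n := by rw [Int.negSucc_eq]; omega
  have h2 : (0 : Int) ≤ (255 : Int) := by norm_num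
  simp only [PySem.Int.band, h1, h2, if_true, if_false]
  have h3 : (-Int.negSucc n - 1).toNat = n := by rw [Int.negSucc_eq]; omega
  have h4 : ((255 : Int)).toNat = 255 := rfl
  rw [h3, h4]
  rfl

set_option maxRecDepth 8192 in
lemma pvCompl255 : ∀ k < 256, 255 - k = 255 ^^^ k := by decide

-- ===== VERDICT (by name: the statement is the Claim_ definition above) =====
theorem crc32_update_spec : Claim_equal_crc32_update := by
  intro crc data_byte _
  unfold Spec_crc32_update
  rw [pvPortA_iter]
  show pvStepI^[8] (PySem.Int.bxor crc data_byte) =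
    PySem.Int.bxor ((PySem.Int.bxor crc data_byte) >>> (8 : Nat))
      (PySem.List.pyGetD crc32_table (PySem.Int.band (PySem.Int.bxor crc data_byte) 255) 0)
  cases hx : PySem.Int.bxor crc data_byte with
  | ofNat m =>
    have hj : m &&& 255 < 256 := by
      have := Nat.and_le_right (n := m) (m := 255); omega
    rw [pvBand255_ofNat, show Int.ofNat (m &&& 255) = ((m &&& 255 : Nat) : Int) from rfl,
      pvLookup _ hj, pvIterI_ofNat, pvIterI_ofNat,
      show (Int.ofNat m) >>> (8 : Nat) = Int.ofNat (m >>> 8) from rfl, pv_bxor_ofNat]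
    rw [pvNat1 m]
  | negSucc n =>
    have hb : 255 &&& n < 256 := by
      have := Nat.and_le_left (n := 255) (m := n); omega
    rw [pvBand255_negSucc, show Int.ofNat (255 - (255 &&& n)) = ((255 - (255 &&& n) : Nat) : Int) from rfl,
      pvLookup _ (by omega), pvIterI_ofNat, pvIterI_negSucc,
      show (Int.negSucc n) >>> (8 : Nat) = Int.negSucc (n >>> 8) from rfl, pv_bxor_negSucc_ofNat]
    rw [pvCompl255 _ hb, Nat.and_comm 255 n]
    rw [pvNat2 n]
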